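-- pv_equiv track=rewrite | github.com/sinitsky96/AI | HW1/HW1_ref/ex1_ans.py | Amount_Doors
-- ===== SOURCE A (Python) =====
-- def Amount_Doors(current_map, keys):
--     doors = 0
--     for row in current_map:
--         for cell in row:
--             if cell == 45 or cell == 46 or cell == 47 or cell == 48 or cell == 49:
--                 have = 0
--                 for key in keys:
--                     if key == cell:
--                         have = 1
--                 if have == 0:
--                     doors += 1
--     return doors
-- ===== SOURCE B (Python) =====
-- def Amount_Doors(current_map, keys):
--     # Frequency table of door values (45..49), then one short pass over the
--     # five door classes adding the tally of each class not covered by keys.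
--     counts = {}
--     for row in current_map:
--         for cell in row:
--             if 45 <= cell <= 49:
--                 counts[cell] = counts.get(cell, 0) + 1
--     doors = 0
--     for v in (45, 46, 47, 48, 49):
--         if v not in keys:
--             doors += counts.get(v, 0)
--     return doors
-- ===== Notes on version B (the rewrite author's own statement) =====
-- stated objective: alternative
-- what changed: Replaces the per-door-cell inner scan of keys by a single frequency-table pass over the map plus a 5-element pass over the door classes; keys is probed at most 5 times instead of once per door cell.
import Mathlib
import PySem

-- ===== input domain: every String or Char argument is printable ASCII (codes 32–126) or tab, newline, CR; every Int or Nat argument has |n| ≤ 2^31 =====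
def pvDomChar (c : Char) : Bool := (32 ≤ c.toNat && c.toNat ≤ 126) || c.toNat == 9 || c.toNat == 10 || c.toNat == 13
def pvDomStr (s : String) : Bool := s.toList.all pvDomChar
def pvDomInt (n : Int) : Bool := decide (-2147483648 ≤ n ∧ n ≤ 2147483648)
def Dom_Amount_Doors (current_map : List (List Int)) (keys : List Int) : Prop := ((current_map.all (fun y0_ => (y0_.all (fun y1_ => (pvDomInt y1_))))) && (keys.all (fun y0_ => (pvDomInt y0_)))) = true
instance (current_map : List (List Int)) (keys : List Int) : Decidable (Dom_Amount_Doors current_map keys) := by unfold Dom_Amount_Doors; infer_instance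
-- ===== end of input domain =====

-- B replaces A's per-door-cell scan of keys by a frequency table of door values plus
-- one pass over the five door classes (objective: alternative decomposition).

-- ===== PORT A =====
def Amount_Doors (current_map : List (List Int)) (keys : List Int) : Int :=
  current_map.foldl (fun doors row =>
    row.foldl (fun doors cell =>
      if cell = 45 ∨ cell = 46 ∨ cell = 47 ∨ cell = 48 ∨ cell = 49 then
        let haveK := keys.foldl (fun h key => if key = cell then 1 else h) (0 : Int)
        if haveK = 0 then doors + 1 else doors
      else doors) doors) 0

-- ===== PORT B =====
def Amount_Doors_alt (current_map : List (List Int)) (keys : List Int) : Int :=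
  let counts : PySem.Dict Int Int :=
    current_map.foldl (fun d row =>
      row.foldl (fun d cell =>
        if 45 ≤ cell ∧ cell ≤ 49 then d.insert cell (d.getD cell 0 + 1) else d) d)
      PySem.Dict.empty
  ([45, 46, 47, 48, 49] : List Int).foldl
    (fun doors v => if ¬ keys.contains v then doors + counts.getD v 0 else doors) 0

-- ===== PRECONDITION & SPEC =====
def Spec_Amount_Doors (current_map : List (List Int)) (keys : List Int) (out : Int) : Prop := out = Amount_Doors_alt current_map keys
instance (current_map : List (List Int)) (keys : List Int) (out : Int) : Decidable (Spec_Amount_Doors current_map keys out) := by unfold Spec_Amount_Doors; infer_instance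

-- ===== CLAIM (what is proved, stated in full; the proofs are below) =====
def Claim_equal_Amount_Doors : Prop := ∀ (current_map : List (List Int)) (keys : List Int), Dom_Amount_Doors current_map keys → Spec_Amount_Doors current_map keys (Amount_Doors current_map keys)

-- ===== LEMMAS AND PROOFS =====

set_option maxHeartbeats 1000000

/-- cell is a door (45..49) and not covered by keys: the cells A counts. -/
def pvDoorNotKeyed (keys : List Int) (c : Int) : Bool :=
  decide ((c = 45 ∨ c = 46 ∨ c = 47 ∨ c = 48 ∨ c = 49) ∧ c ∉ keys)

/-- A's inner `have` loop is a membership test. -/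
theorem have_foldl (keys : List Int) (cell : Int) (h0 : Int) :
    keys.foldl (fun h key => if key = cell then 1 else h) h0
      = if cell ∈ keys then 1 else h0 := by
  induction keys generalizing h0 with
  | nil => simp
  | cons k ks ih =>
    simp only [List.foldl_cons, List.mem_cons]
    by_cases hk : k = cell
    · subst hk; simp [ih]
    · simp [hk, ih, Ne.symm hk]

/-- A's cell loop counts door cells not covered by keys. -/
theorem A_foldl_eq (keys : List Int) (cells : List Int) (a : Int) :
    cells.foldl (fun doors cell =>
      if cell = 45 ∨ cell = 46 ∨ cell = 47 ∨ cell = 48 ∨ cell = 49 then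
        let haveK := keys.foldl (fun h key => if key = cell then 1 else h) (0 : Int)
        if haveK = 0 then doors + 1 else doors
      else doors) a
    = a + (cells.countP (pvDoorNotKeyed keys) : Int) := by
  induction cells generalizing a with
  | nil => simp
  | cons c l ih =>
    rw [List.foldl_cons, ih, List.countP_cons]
    simp only [have_foldl]
    by_cases hd : c = 45 ∨ c = 46 ∨ c = 47 ∨ c = 48 ∨ c = 49
    · by_cases hk : c ∈ keys
      · simp [pvDoorNotKeyed, hd, hk]
      · simp [pvDoorNotKeyed, hd, hk]
        push_cast; ring
    · simp [pvDoorNotKeyed, hd]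

/-- B's counter loop tallies each door value. -/
theorem counts_getD (cells : List Int) (v : Int) (hv : 45 ≤ v ∧ v ≤ 49) (d : PySem.Dict Int Int) :
    (cells.foldl (fun d cell =>
        if 45 ≤ cell ∧ cell ≤ 49 then d.insert cell (d.getD cell 0 + 1) else d) d).getD v 0
      = d.getD v 0 + (cells.count v : Int) := by
  induction cells generalizing d with
  | nil => simp
  | cons c l ih =>
    simp only [List.foldl_cons, List.count_cons]
    by_cases hc : 45 ≤ c ∧ c ≤ 49
    · rw [if_pos hc, ih, PySem.Dict.getD_insert]
      by_cases hvc : v = c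
      · subst hvc; simp; push_cast; ring
      · simp [hvc, Ne.symm hvc]
    · have hne : v ≠ c := by omega
      rw [if_neg hc, ih]
      simp [Ne.symm hne]

/-- count of v among cells, zeroed when keys covers v. -/
def pvG (keys cells : List Int) (v : Int) : Int :=
  if v ∈ keys then 0 else (cells.count v : Int)

theorem pvG_cons (keys l : List Int) (c v : Int) :
    pvG keys (c :: l) v
      = pvG keys l v + (if v ∈ keys then 0 else if c = v then (1 : Int) else 0) := by
  unfold pvG
  by_cases hk : v ∈ keys
  · simp [hk]
  · simp only [hk, if_false, List.count_cons]
    by_cases hc : c = v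
    · simp [hc]
    · simp [hc]

/-- Per-cell contribution split over the five door classes. -/
theorem cell_term (keys : List Int) (c : Int) :
    (if pvDoorNotKeyed keys c = true then (1 : Int) else 0)
      = (if (45 : Int) ∈ keys then 0 else if c = 45 then (1:Int) else 0)
      + (if (46 : Int) ∈ keys then 0 else if c = 46 then (1:Int) else 0)
      + (if (47 : Int) ∈ keys then 0 else if c = 47 then (1:Int) else 0)
      + (if (48 : Int) ∈ keys then 0 else if c = 48 then (1:Int) else 0)
      + (if (49 : Int) ∈ keys then 0 else if c = 49 then (1:Int) else 0) := by
  by_cases h45 : c = 45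
  · subst h45; by_cases k : (45:Int) ∈ keys <;> simp [pvDoorNotKeyed, k]
  · by_cases h46 : c = 46
    · subst h46; by_cases k : (46:Int) ∈ keys <;> simp [pvDoorNotKeyed, k, h45]
    · by_cases h47 : c = 47
      · subst h47; by_cases k : (47:Int) ∈ keys <;> simp [pvDoorNotKeyed, k, h45, h46]
      · by_cases h48 : c = 48
        · subst h48; by_cases k : (48:Int) ∈ keys <;> simp [pvDoorNotKeyed, k, h45, h46, h47]
        · by_cases h49 : c = 49
          · subst h49; by_cases k : (49:Int) ∈ keys <;> simp [pvDoorNotKeyed, k, h45, h46, h47, h48]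
          · simp [pvDoorNotKeyed, h45, h46, h47, h48, h49]

/-- The count of uncovered door cells equals the sum over the five door classes. -/
theorem countP_eq_sum (keys cells : List Int) :
    (cells.countP (pvDoorNotKeyed keys) : Int)
      = pvG keys cells 45 + pvG keys cells 46 + pvG keys cells 47
        + pvG keys cells 48 + pvG keys cells 49 := by
  induction cells with
  | nil => simp [pvG]
  | cons c l ih =>
    rw [List.countP_cons]
    have hsplit : ((l.countP (pvDoorNotKeyed keys)
        + if pvDoorNotKeyed keys c = true then 1 else 0 : ℕ) : ℤ)
        = (l.countP (pvDoorNotKeyed keys) : ℤ)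
          + (if pvDoorNotKeyed keys c = true then (1:ℤ) else 0) := by
      split_ifs <;> push_cast <;> ring
    rw [hsplit, ih, cell_term,
        pvG_cons keys l c 45, pvG_cons keys l c 46, pvG_cons keys l c 47,
        pvG_cons keys l c 48, pvG_cons keys l c 49]
    ring

-- ===== VERDICT (by name: the statement is the Claim_ definition above) =====
theorem Amount_Doors_spec : Claim_equal_Amount_Doors := by
  intro current_map keys _
  unfold Spec_Amount_Doors Amount_Doors Amount_Doors_alt
  rw [← List.foldl_flatten, ← List.foldl_flatten, A_foldl_eq, countP_eq_sum]
  simp only [List.foldl_cons, List.foldl_nil, zero_add]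
  rw [counts_getD _ 45 (by norm_num), counts_getD _ 46 (by norm_num),
      counts_getD _ 47 (by norm_num), counts_getD _ 48 (by norm_num),
      counts_getD _ 49 (by norm_num)]
  simp only [PySem.Dict.getD_empty, zero_add, pvG, List.contains_iff_mem, ite_not]
  by_cases k45 : (45:Int) ∈ keys <;> by_cases k46 : (46:Int) ∈ keys <;>
    by_cases k47 : (47:Int) ∈ keys <;> by_cases k48 : (48:Int) ∈ keys <;>
    by_cases k49 : (49:Int) ∈ keys <;>
    simp [k45, k46, k47, k48, k49]
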